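-- pv_equiv track=rewrite | github.com/Ashutosh-Tripathy/Online-Hackathon | Spoj/DevideWegithEqually2.py | DevidedLoadEqually
-- ===== SOURCE A (Python) =====
-- def DevidedLoadEqually(leftLoad,rightLoad,leftArray,rightArray,index,array):
-- 	if(index<len(array)-1):
-- 		leftLoad,rightLoad,leftArray,rightArray=DevidedLoadEqually(leftLoad,rightLoad,leftArray,rightArray,index+1,array)
-- 	if(rightLoad<leftLoad):
-- 		rightLoad+=array[index]
-- 		rightArray.append(index+1)
-- 		if(rightLoad>leftLoad):
-- 			temp=rightLoad
-- 			rightLoad=leftLoad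
-- 			leftLoad=temp
-- 			temp=rightArray
-- 			rightArray=leftArray
-- 			leftArray=temp
-- 	else:
-- 		leftLoad+=array[index]
-- 		leftArray.append(index+1)
-- 	# print ('L: '+str(leftLoad)+'   R: '+str(rightLoad))
-- 	# print (leftArray)
-- 	# print (rightArray)
-- 	return leftLoad,rightLoad,leftArray,rightArray
-- ===== SOURCE B (Python) =====
-- # Staged re-implementation: build the (label, value) work list once, then fold a flat
-- # three-branch greedy step over it in reverse; caller's lists are not mutated (A mutates
-- # them via .append) -- the return value is identical.
-- def DevidedLoadEqually(leftLoad, rightLoad, leftArray, rightArray, index, array):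
--     work = [(i + 1, array[i]) for i in range(index, len(array))]
--     for lab, x in reversed(work):
--         if leftLoad <= rightLoad:
--             leftLoad, leftArray = leftLoad + x, leftArray + [lab]
--         elif leftLoad < rightLoad + x:
--             leftLoad, rightLoad = rightLoad + x, leftLoad
--             leftArray, rightArray = rightArray + [lab], leftArray
--         else:
--             rightLoad, rightArray = rightLoad + x, rightArray + [lab]
--     return leftLoad, rightLoad, leftArray, rightArray
-- ===== Notes on version B (the rewrite author's own statement) =====
-- stated objective: alternative
-- what changed: A's recursion (recurse to the top index, then apply a nested add-then-swap step while unwinding) is replaced by two stages: build the (label, value) work list [(i+1, array[i]) for i in range(index, len(array))] once, then fold one flat three-branch greedy step (add-left / add-and-swap / add-right) over its reverse; B also leaves the caller's lists unmutated (return value is identical).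
import Mathlib
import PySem

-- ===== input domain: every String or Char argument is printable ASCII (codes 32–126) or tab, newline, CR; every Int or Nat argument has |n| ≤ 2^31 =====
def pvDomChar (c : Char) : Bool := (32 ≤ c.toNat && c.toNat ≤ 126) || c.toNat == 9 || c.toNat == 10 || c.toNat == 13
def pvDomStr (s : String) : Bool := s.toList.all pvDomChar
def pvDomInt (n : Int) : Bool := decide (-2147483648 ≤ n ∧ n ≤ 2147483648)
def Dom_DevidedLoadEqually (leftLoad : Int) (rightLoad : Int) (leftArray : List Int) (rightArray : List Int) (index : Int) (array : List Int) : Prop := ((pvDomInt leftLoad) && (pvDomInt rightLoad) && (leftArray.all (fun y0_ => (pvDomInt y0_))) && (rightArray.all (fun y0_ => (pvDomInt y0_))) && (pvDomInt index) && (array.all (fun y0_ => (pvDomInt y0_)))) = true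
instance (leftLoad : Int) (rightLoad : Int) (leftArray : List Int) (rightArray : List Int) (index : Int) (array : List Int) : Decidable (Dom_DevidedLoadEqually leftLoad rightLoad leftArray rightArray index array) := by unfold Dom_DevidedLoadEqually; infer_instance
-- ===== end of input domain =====

-- B stages the work: it builds the (label, value) list once, then folds one flat three-branch
-- greedy step over its reverse, replacing A's recursion (objective: simpler); A mutates the
-- caller's two lists via .append while B does not — the equivalence proved is about the RETURN value.

-- ===== PORT A =====
-- literal port of A's recursion; array[index] (negative indices wrap, out of range = IndexError)
-- is PySem.List.pyGet?; `.getD 0` is only reached outside Pre_ (there Python A raises).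
def DevidedLoadEqually (leftLoad : Int) (rightLoad : Int) (leftArray : List Int) (rightArray : List Int) (index : Int) (array : List Int) : Int × Int × List Int × List Int :=
  let s :=
    if index < (array.length : Int) - 1 then
      DevidedLoadEqually leftLoad rightLoad leftArray rightArray (index + 1) array
    else (leftLoad, rightLoad, leftArray, rightArray)
  match s with
  | (ll, rl, la, ra) =>
    if rl < ll then
      let rl' := rl + (PySem.List.pyGet? array index).getD 0
      let ra' := ra ++ [index + 1]
      if rl' > ll then (rl', ll, ra', la) else (ll, rl', la, ra')
    else (ll + (PySem.List.pyGet? array index).getD 0, rl, la ++ [index + 1], ra)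
termination_by (((array.length : Int) - index).toNat)
decreasing_by omega

-- ===== PORT B =====
-- literal port of Source B's loop body: one flat three-branch greedy step on a labelled value.
def pvStepB (s : Int × Int × List Int × List Int) (p : Int × Int) : Int × Int × List Int × List Int :=
  match s, p with
  | (ll, rl, la, ra), (lab, x) =>
    if ll ≤ rl then (ll + x, rl, la ++ [lab], ra)
    else if ll < rl + x then (rl + x, ll, ra ++ [lab], la)
    else (ll, rl + x, la, ra ++ [lab])

-- literal port of Source B: build the work list [(i+1, array[i]) for i in range(index, len(array))],
-- then fold pvStepB over its reverse.
def DevidedLoadEqually_alt (leftLoad : Int) (rightLoad : Int) (leftArray : List Int) (rightArray : List Int) (index : Int) (array : List Int) : Int × Int × List Int × List Int :=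
  let work := (PySem.List.pyRange index (array.length : Int) 1).map
    (fun i => (i + 1, (PySem.List.pyGet? array i).getD 0))
  work.reverse.foldl pvStepB (leftLoad, rightLoad, leftArray, rightArray)

-- ===== PRECONDITION & SPEC =====
-- Pre_ excludes exactly the inputs where Python A raises IndexError: empty array, or an index
-- outside [-len(array), len(array)) (A always evaluates array[index] at least once).
def Pre_DevidedLoadEqually (leftLoad : Int) (rightLoad : Int) (leftArray : List Int) (rightArray : List Int) (index : Int) (array : List Int) : Prop :=
  array ≠ [] ∧ -(array.length : Int) ≤ index ∧ index < (array.length : Int)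
instance (leftLoad : Int) (rightLoad : Int) (leftArray : List Int) (rightArray : List Int) (index : Int) (array : List Int) : Decidable (Pre_DevidedLoadEqually leftLoad rightLoad leftArray rightArray index array) := by unfold Pre_DevidedLoadEqually; infer_instance

def pvWitness_DevidedLoadEqually : Int × Int × List Int × List Int × Int × List Int := (0, 0, [], [], 0, [3, 1, 2])

def Spec_DevidedLoadEqually (leftLoad : Int) (rightLoad : Int) (leftArray : List Int) (rightArray : List Int) (index : Int) (array : List Int) (out : Int × Int × List Int × List Int) : Prop := out = DevidedLoadEqually_alt leftLoad rightLoad leftArray rightArray index array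
instance (leftLoad : Int) (rightLoad : Int) (leftArray : List Int) (rightArray : List Int) (index : Int) (array : List Int) (out : Int × Int × List Int × List Int) : Decidable (Spec_DevidedLoadEqually leftLoad rightLoad leftArray rightArray index array out) := by unfold Spec_DevidedLoadEqually; infer_instance

-- ===== CLAIM (what is proved, stated in full; the proofs are below) =====
def Claim_equal_DevidedLoadEqually : Prop := ∀ (leftLoad : Int) (rightLoad : Int) (leftArray : List Int) (rightArray : List Int) (index : Int) (array : List Int), Dom_DevidedLoadEqually leftLoad rightLoad leftArray rightArray index array → Pre_DevidedLoadEqually leftLoad rightLoad leftArray rightArray index array → Spec_DevidedLoadEqually leftLoad rightLoad leftArray rightArray index array (DevidedLoadEqually leftLoad rightLoad leftArray rightArray index array)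

-- ===== LEMMAS AND PROOFS =====

-- A's combined add/swap step is B's flat three-branch step
lemma pv_step_eq (ll rl x : Int) (la ra : List Int) (i : Int) :
    (if rl < ll then
       if rl + x > ll then (rl + x, ll, ra ++ [i + 1], la) else (ll, rl + x, la, ra ++ [i + 1])
     else (ll + x, rl, la ++ [i + 1], ra))
    = pvStepB (ll, rl, la, ra) (i + 1, x) := by
  simp only [pvStepB]
  split_ifs <;> first | rfl | omega

-- unfolding B by one index at the front of the range
lemma pv_alt_unfold (leftLoad rightLoad : Int) (leftArray rightArray : List Int)
    (index : Int) (array : List Int) (h : index < (array.length : Int)) :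
    DevidedLoadEqually_alt leftLoad rightLoad leftArray rightArray index array
      = pvStepB (DevidedLoadEqually_alt leftLoad rightLoad leftArray rightArray (index + 1) array)
          (index + 1, (PySem.List.pyGet? array index).getD 0) := by
  unfold DevidedLoadEqually_alt
  rw [PySem.List.pyRange_one_cons h]
  simp [List.foldl_append]

-- the empty tail case of B
lemma pv_alt_nil (leftLoad rightLoad : Int) (leftArray rightArray : List Int)
    (index : Int) (array : List Int) (h : (array.length : Int) ≤ index) :
    DevidedLoadEqually_alt leftLoad rightLoad leftArray rightArray index array
      = (leftLoad, rightLoad, leftArray, rightArray) := by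
  unfold DevidedLoadEqually_alt
  rw [PySem.List.pyRange_one_eq_nil h]
  rfl

-- A's recursive unwinding equals B's staged fold, for any index below len(array)
lemma pv_main (array : List Int) (index : Int) (h : index < (array.length : Int)) :
    ∀ (leftLoad rightLoad : Int) (leftArray rightArray : List Int),
    DevidedLoadEqually leftLoad rightLoad leftArray rightArray index array
      = DevidedLoadEqually_alt leftLoad rightLoad leftArray rightArray index array := by
  generalize hk : (((array.length : Int) - 1 - index).toNat) = k
  induction k generalizing index with
  | zero =>
    intro ll rl la ra
    rw [DevidedLoadEqually]
    simp only [if_neg (by omega : ¬ index < (array.length : Int) - 1)]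
    rw [pv_alt_unfold ll rl la ra index array h,
        pv_alt_nil ll rl la ra (index + 1) array (by omega)]
    exact pv_step_eq ll rl ((PySem.List.pyGet? array index).getD 0) la ra index
  | succ k ih =>
    intro ll rl la ra
    have hlt : index < (array.length : Int) - 1 := by omega
    rw [DevidedLoadEqually]
    simp only [if_pos hlt]
    rw [ih (index + 1) (by omega) (by omega)]
    rw [pv_alt_unfold ll rl la ra index array h]
    rcases hs : DevidedLoadEqually_alt ll rl la ra (index + 1) array with ⟨ll', rl', la', ra'⟩
    exact pv_step_eq ll' rl' ((PySem.List.pyGet? array index).getD 0) la' ra' index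

-- ===== VERDICT (by name: the statement is the Claim_ definition above) =====
theorem DevidedLoadEqually_spec : Claim_equal_DevidedLoadEqually := by
  intro ll rl la ra index array _ hpre
  exact pv_main array index hpre.2.2 ll rl la ra
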